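-- pv_equiv track=rewrite | github.com/ltnanh/ctf_crypto | dreamhack/almost_random/solve.py | untempering
-- ===== SOURCE A (Python) =====
-- def untempering(y):
--     y = y ^(y>>18)
--
--     y = y^((y<<15) & 0xefc60000)
--
--     temp = y
--     for _ in range(4):
--         temp = y ^ ((temp << 7) & 0x9d2c5680)
--     y = temp
--
--     temp = y
--     for _ in range(2):
--         temp = y ^ (temp >> 11)
--     y = temp
--
--     return y
-- ===== SOURCE B (Python) =====
-- def _undo_right(y, s):
--     # invert x ^ (x >> s): recover word-sized windows from the high end
--     res = 0
--     for i in range(0, 32, s):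
--         if 32 - s - i >= 0:
--             window = ((1 << s) - 1) << (32 - s - i)
--         else:
--             window = (1 << (32 - i)) - 1
--         res ^= (y ^ (res >> s)) & window
--     return res
--
-- def _undo_left_mask(y, s, m):
--     # invert x ^ ((x << s) & m): recover s-bit windows from the low end
--     res = 0
--     for i in range(0, 32, s):
--         window = ((1 << s) - 1) << i
--         res ^= (y ^ ((res << s) & m)) & window
--     return res
--
-- def untempering(y):
--     res = _undo_right(y, 18)
--     res = _undo_left_mask(res, 15, 0xefc60000)
--     res = _undo_left_mask(res, 7, 0x9d2c5680)
--     res = _undo_right(res, 11)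
--     return res
-- ===== Notes on version B (the rewrite author's own statement) =====
-- stated objective: idiomatic
-- what changed: Each of the four tempering steps is inverted by the canonical progressive bit-window reconstruction (a single accumulator recovering successive windows of the result, high-to-low for the right-shift steps and low-to-high for the masked left-shift steps) instead of A's fixed-count fixed-point re-application loops.
-- outside the precondition, e.g. on untempering(-1): A returns 0, B returns 316513203
import Mathlib
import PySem

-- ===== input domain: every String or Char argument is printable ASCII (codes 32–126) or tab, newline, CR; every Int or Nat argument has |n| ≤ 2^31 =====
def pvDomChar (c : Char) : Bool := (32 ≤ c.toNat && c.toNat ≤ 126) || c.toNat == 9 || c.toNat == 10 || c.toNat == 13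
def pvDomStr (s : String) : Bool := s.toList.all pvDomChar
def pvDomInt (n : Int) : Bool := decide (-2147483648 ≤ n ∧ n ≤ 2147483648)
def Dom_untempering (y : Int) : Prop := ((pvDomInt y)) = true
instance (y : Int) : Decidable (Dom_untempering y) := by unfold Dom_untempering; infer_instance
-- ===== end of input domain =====

-- B inverts each tempering step by progressive bit-window reconstruction (one accumulator per
-- step) instead of A's fixed-count fixed-point iteration; same result on the stated domain, no speed claim.

-- ===== PORT A =====
def untempering (y : Int) : Int :=
  let y1 := PySem.Int.bxor y (y >>> (18 : Nat))
  let y2 := PySem.Int.bxor y1 (PySem.Int.band (y1 <<< (15 : Nat)) 0xefc60000)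
  let y3 := (List.range 4).foldl
    (fun temp _ => PySem.Int.bxor y2 (PySem.Int.band (temp <<< (7 : Nat)) 0x9d2c5680)) y2
  let y4 := (List.range 2).foldl
    (fun temp _ => PySem.Int.bxor y3 (temp >>> (11 : Nat))) y3
  y4

-- ===== PORT B =====
-- invert x ^ (x >> s): recover 32-bit windows from the high end
def undoRight (y s : Int) : Int :=
  (PySem.List.pyRange 0 32 s).foldl (fun res i =>
    let window : Int :=
      if 32 - s - i ≥ 0 then ((1 <<< s.toNat) - 1) <<< (32 - s - i).toNat
      else (1 <<< (32 - i).toNat) - 1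
    PySem.Int.bxor res (PySem.Int.band (PySem.Int.bxor y (res >>> s.toNat)) window)) 0

-- invert x ^ ((x << s) & m): recover s-bit windows from the low end
def undoLeftMask (y s m : Int) : Int :=
  (PySem.List.pyRange 0 32 s).foldl (fun res i =>
    let window : Int := ((1 <<< s.toNat) - 1) <<< i.toNat
    PySem.Int.bxor res (PySem.Int.band (PySem.Int.bxor y (PySem.Int.band (res <<< s.toNat) m)) window)) 0

def untempering_alt (y : Int) : Int :=
  let r1 := undoRight y 18
  let r2 := undoLeftMask r1 15 0xefc60000
  let r3 := undoLeftMask r2 7 0x9d2c5680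
  undoRight r3 11

-- ===== PRECONDITION & SPEC =====
-- Pre_ excludes negative y: MT19937 untempering is defined on thirty-two-bit machine words,
-- and on negative inputs A's arithmetic shifts act on an infinite two's-complement sign
-- extension, a value outside the function's purpose that B's word-sized window
-- reconstruction does not reproduce.
def Pre_untempering (y : Int) : Prop := 0 ≤ y
instance (y : Int) : Decidable (Pre_untempering y) := by unfold Pre_untempering; infer_instance
def pvWitness_untempering : Int := 123456789
def Spec_untempering (y : Int) (out : Int) : Prop := out = untempering_alt y
instance (y : Int) (out : Int) : Decidable (Spec_untempering y out) := by unfold Spec_untempering; infer_instance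

-- ===== CLAIM (what is proved, stated in full; the proofs are below) =====
def Claim_equal_untempering : Prop :=
  ∀ (y : Int), Dom_untempering y → Pre_untempering y → Spec_untempering y (untempering y)

-- ===== LEMMAS AND PROOFS =====

-- Nat mirrors of A's four stages (the constant-length loops unrolled)
def s1A (n : Nat) : Nat := n ^^^ (n >>> 18)
def s2A (n : Nat) : Nat := n ^^^ ((n <<< 15) &&& 0xefc60000)
def s3A (n : Nat) : Nat :=
  let t1 := n ^^^ ((n <<< 7) &&& 0x9d2c5680)
  let t2 := n ^^^ ((t1 <<< 7) &&& 0x9d2c5680)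
  let t3 := n ^^^ ((t2 <<< 7) &&& 0x9d2c5680)
  n ^^^ ((t3 <<< 7) &&& 0x9d2c5680)
def s4A (n : Nat) : Nat :=
  let t1 := n ^^^ (n >>> 11)
  n ^^^ (t1 >>> 11)

-- Nat mirrors of B's four stages (the window loops unrolled)
def s1B (n : Nat) : Nat :=
  let r1 := 0 ^^^ ((n ^^^ (0 >>> 18)) &&& (((1 <<< 18) - 1) <<< 14))
  r1 ^^^ ((n ^^^ (r1 >>> 18)) &&& ((1 <<< 14) - 1))
def s2B (n : Nat) : Nat :=
  let r1 := 0 ^^^ ((n ^^^ ((0 <<< 15) &&& 0xefc60000)) &&& (((1 <<< 15) - 1) <<< 0))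
  let r2 := r1 ^^^ ((n ^^^ ((r1 <<< 15) &&& 0xefc60000)) &&& (((1 <<< 15) - 1) <<< 15))
  r2 ^^^ ((n ^^^ ((r2 <<< 15) &&& 0xefc60000)) &&& (((1 <<< 15) - 1) <<< 30))
def s3B (n : Nat) : Nat :=
  let r1 := 0 ^^^ ((n ^^^ ((0 <<< 7) &&& 0x9d2c5680)) &&& (((1 <<< 7) - 1) <<< 0))
  let r2 := r1 ^^^ ((n ^^^ ((r1 <<< 7) &&& 0x9d2c5680)) &&& (((1 <<< 7) - 1) <<< 7))
  let r3 := r2 ^^^ ((n ^^^ ((r2 <<< 7) &&& 0x9d2c5680)) &&& (((1 <<< 7) - 1) <<< 14))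
  let r4 := r3 ^^^ ((n ^^^ ((r3 <<< 7) &&& 0x9d2c5680)) &&& (((1 <<< 7) - 1) <<< 21))
  r4 ^^^ ((n ^^^ ((r4 <<< 7) &&& 0x9d2c5680)) &&& (((1 <<< 7) - 1) <<< 28))
def s4B (n : Nat) : Nat :=
  let r1 := 0 ^^^ ((n ^^^ (0 >>> 11)) &&& (((1 <<< 11) - 1) <<< 21))
  let r2 := r1 ^^^ ((n ^^^ (r1 >>> 11)) &&& (((1 <<< 11) - 1) <<< 10))
  r2 ^^^ ((n ^^^ (r2 >>> 11)) &&& ((1 <<< 10) - 1))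

-- GF(2) linearity toolkit
lemma shiftRight_xor (a b s : Nat) : (a ^^^ b) >>> s = a >>> s ^^^ b >>> s :=
  Nat.eq_of_testBit_eq (by simp [Nat.testBit_shiftRight, Nat.testBit_xor])

lemma shiftLeft_xor (a b s : Nat) : (a ^^^ b) <<< s = a <<< s ^^^ b <<< s := by
  refine Nat.eq_of_testBit_eq fun i => ?_
  simp only [Nat.testBit_shiftLeft, Nat.testBit_xor]
  by_cases h : s ≤ i <;> simp [h]

lemma pow_xor_add {k r : Nat} (h : r < 2 ^ k) : 2 ^ k ^^^ r = 2 ^ k + r := by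
  refine Nat.eq_of_testBit_eq fun i => ?_
  rw [Nat.testBit_xor, Nat.testBit_two_pow]
  rcases lt_trichotomy i k with hi | rfl | hi
  · rw [Nat.testBit_two_pow_add_gt hi]
    have hne : k ≠ i := by omega
    simp [hne]
  · rw [Nat.testBit_two_pow_add_eq, Nat.testBit_lt_two_pow h]
    simp
  · have h1 : r.testBit i = false :=
      Nat.testBit_lt_two_pow (h.trans (Nat.pow_lt_pow_right one_lt_two hi))
    have h2 : (2 ^ k + r).testBit i = false := Nat.testBit_lt_two_pow (by
      have hlt : (2 : Nat) ^ k + r < 2 ^ (k + 1) := by rw [pow_succ]; omega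
      exact hlt.trans_le (Nat.pow_le_pow_right (by norm_num) hi))
    have hne : k ≠ i := by omega
    simp [h1, h2, hne]

-- two GF(2)-linear maps agreeing on the 32 basis vectors agree below 2^32
lemma linEq (f g : Nat → Nat)
    (hf : ∀ a b, f (a ^^^ b) = f a ^^^ f b)
    (hg : ∀ a b, g (a ^^^ b) = g a ^^^ g b)
    (hb : ∀ i, i < 32 → f (2 ^ i) = g (2 ^ i)) :
    ∀ n, n < 2 ^ 32 → f n = g n := by
  have hf0 : f 0 = 0 := by simpa using hf 0 0
  have hg0 : g 0 = 0 := by simpa using hg 0 0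
  suffices H : ∀ k, k ≤ 32 → ∀ n, n < 2 ^ k → f n = g n from fun n hn => H 32 le_rfl n hn
  intro k
  induction k with
  | zero =>
    intro _ n hn
    have hn0 : n = 0 := by simpa using hn
    simp [hn0, hf0, hg0]
  | succ k ih =>
    intro hk n hn
    by_cases hcase : n < 2 ^ k
    · exact ih (by omega) n hcase
    · have hp : (2 : Nat) ^ (k + 1) = 2 ^ k * 2 := pow_succ 2 k
      have hr : n - 2 ^ k < 2 ^ k := by omega
      have hd : n = 2 ^ k ^^^ (n - 2 ^ k) := by rw [pow_xor_add hr]; omega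
      rw [hd, hf, hg, ih (by omega) _ hr, hb k (by omega)]

set_option maxHeartbeats 1000000 in
lemma lin_s1A (a b : Nat) : s1A (a ^^^ b) = s1A a ^^^ s1A b := by
  simp [s1A, shiftRight_xor, Nat.xor_assoc, Nat.xor_comm, Nat.xor_left_comm]
set_option maxHeartbeats 1000000 in
lemma lin_s2A (a b : Nat) : s2A (a ^^^ b) = s2A a ^^^ s2A b := by
  simp [s2A, shiftLeft_xor, Nat.and_xor_distrib_right, Nat.xor_assoc, Nat.xor_comm, Nat.xor_left_comm]
-- one masked-left-shift iteration of A is GF(2)-linear (congruence form, applied inside-out)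
lemma stepL_congr (s m na nb ta tb t : Nat) (h : t = ta ^^^ tb) :
    (na ^^^ nb) ^^^ ((t <<< s) &&& m)
      = (na ^^^ ((ta <<< s) &&& m)) ^^^ (nb ^^^ ((tb <<< s) &&& m)) := by
  subst h
  simp [shiftLeft_xor, Nat.and_xor_distrib_right, Nat.xor_comm, Nat.xor_left_comm]

lemma lin_s3A (a b : Nat) : s3A (a ^^^ b) = s3A a ^^^ s3A b := by
  simp only [s3A]
  exact stepL_congr _ _ _ _ _ _ _ (stepL_congr _ _ _ _ _ _ _
    (stepL_congr _ _ _ _ _ _ _ (stepL_congr _ _ _ _ _ _ _ rfl)))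
set_option maxHeartbeats 1000000 in
lemma lin_s4A (a b : Nat) : s4A (a ^^^ b) = s4A a ^^^ s4A b := by
  simp [s4A, shiftRight_xor, Nat.xor_assoc, Nat.xor_comm, Nat.xor_left_comm]
set_option maxHeartbeats 1000000 in
lemma lin_s1B (a b : Nat) : s1B (a ^^^ b) = s1B a ^^^ s1B b := by
  simp [s1B, shiftRight_xor, Nat.and_xor_distrib_right, Nat.xor_assoc, Nat.xor_comm, Nat.xor_left_comm]
-- one window iteration of B's masked-left-shift loop is GF(2)-linear (congruence form)
lemma stepBL_congr (s m w na nb ra rb r : Nat) (h : r = ra ^^^ rb) :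
    r ^^^ (((na ^^^ nb) ^^^ ((r <<< s) &&& m)) &&& w)
      = (ra ^^^ ((na ^^^ ((ra <<< s) &&& m)) &&& w))
        ^^^ (rb ^^^ ((nb ^^^ ((rb <<< s) &&& m)) &&& w)) := by
  subst h
  simp [shiftLeft_xor, Nat.and_xor_distrib_right, Nat.xor_comm, Nat.xor_left_comm]

lemma lin_s2B (a b : Nat) : s2B (a ^^^ b) = s2B a ^^^ s2B b := by
  simp only [s2B]
  exact stepBL_congr _ _ _ _ _ _ _ _ (stepBL_congr _ _ _ _ _ _ _ _
    (stepBL_congr _ _ _ _ _ _ _ _ rfl))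
lemma lin_s3B (a b : Nat) : s3B (a ^^^ b) = s3B a ^^^ s3B b := by
  simp only [s3B]
  exact stepBL_congr _ _ _ _ _ _ _ _ (stepBL_congr _ _ _ _ _ _ _ _
    (stepBL_congr _ _ _ _ _ _ _ _ (stepBL_congr _ _ _ _ _ _ _ _
      (stepBL_congr _ _ _ _ _ _ _ _ rfl))))
set_option maxHeartbeats 4000000 in
lemma lin_s4B (a b : Nat) : s4B (a ^^^ b) = s4B a ^^^ s4B b := by
  simp [s4B, shiftRight_xor, Nat.and_xor_distrib_right, Nat.xor_assoc, Nat.xor_comm, Nat.xor_left_comm]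

lemma eq_s1 : ∀ n, n < 2 ^ 32 → s1A n = s1B n :=
  linEq s1A s1B lin_s1A lin_s1B (by decide)
lemma eq_s2 : ∀ n, n < 2 ^ 32 → s2A n = s2B n :=
  linEq s2A s2B lin_s2A lin_s2B (by decide)
lemma eq_s3 : ∀ n, n < 2 ^ 32 → s3A n = s3B n :=
  linEq s3A s3B lin_s3A lin_s3B (by decide)
lemma eq_s4 : ∀ n, n < 2 ^ 32 → s4A n = s4B n :=
  linEq s4A s4B lin_s4A lin_s4B (by decide)

lemma range_s1A {n : Nat} (h : n < 2 ^ 32) : s1A n < 2 ^ 32 :=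
  Nat.xor_lt_two_pow h (lt_of_le_of_lt (Nat.shiftRight_le n 18) h)
lemma range_s2A {n : Nat} (h : n < 2 ^ 32) : s2A n < 2 ^ 32 :=
  Nat.xor_lt_two_pow h (lt_of_le_of_lt Nat.and_le_right (by norm_num))
lemma range_s3A {n : Nat} (h : n < 2 ^ 32) : s3A n < 2 ^ 32 := by
  unfold s3A
  exact Nat.xor_lt_two_pow h (lt_of_le_of_lt Nat.and_le_right (by norm_num))
lemma pyRange_18 : PySem.List.pyRange 0 32 18 = [0, 18] := by decide
lemma pyRange_15 : PySem.List.pyRange 0 32 15 = [0, 15, 30] := by decide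
lemma pyRange_7 : PySem.List.pyRange 0 32 7 = [0, 7, 14, 21, 28] := by decide
lemma pyRange_11 : PySem.List.pyRange 0 32 11 = [0, 11, 22] := by decide

lemma bridgeA (n : Nat) : untempering (n : Int) = ((s4A (s3A (s2A (s1A n))) : Nat) : Int) := by
  simp only [untempering, show (List.range 4) = [0, 1, 2, 3] from rfl,
    show (List.range 2) = [0, 1] from rfl, List.foldl_cons, List.foldl_nil]
  simp only [show ((0xefc60000 : Int) = (((0xefc60000 : Nat)) : Int)) from by norm_num,
    show ((0x9d2c5680 : Int) = (((0x9d2c5680 : Nat)) : Int)) from by norm_num,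
    ← Int.natCast_shiftRight, ← Int.natCast_shiftLeft,
    PySem.Int.bxor_natCast, PySem.Int.band_natCast, Nat.cast_inj]
  simp [s1A, s2A, s3A, s4A]

lemma bridgeB1 (n : Nat) : undoRight (n : Int) 18 = ((s1B n : Nat) : Int) := by
  simp only [undoRight, pyRange_18, List.foldl_cons, List.foldl_nil, s1B]
  norm_num [show Int.toNat 0 = 0 from rfl, show Int.toNat 7 = 7 from rfl, show Int.toNat 10 = 10 from rfl, show Int.toNat 11 = 11 from rfl, show Int.toNat 14 = 14 from rfl, show Int.toNat 15 = 15 from rfl, show Int.toNat 18 = 18 from rfl, show Int.toNat 21 = 21 from rfl, show Int.toNat 22 = 22 from rfl, show Int.toNat 28 = 28 from rfl, show Int.toNat 30 = 30 from rfl]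
  simp only [show ((1 : Int) <<< (14 : Nat) - 1 = (((16383 : Nat)) : Int)) from by decide,
    show ((0 : Int) = (((0 : Nat)) : Int)) from rfl,
    ← Int.natCast_shiftRight, ← Int.natCast_shiftLeft,
    PySem.Int.bxor_natCast, PySem.Int.band_natCast, Nat.cast_inj]
  simp

lemma bridgeB2 (n : Nat) : undoLeftMask (n : Int) 15 0xefc60000 = ((s2B n : Nat) : Int) := by
  simp only [undoLeftMask, pyRange_15, List.foldl_cons, List.foldl_nil, s2B]
  norm_num [show Int.toNat 0 = 0 from rfl, show Int.toNat 7 = 7 from rfl, show Int.toNat 10 = 10 from rfl, show Int.toNat 11 = 11 from rfl, show Int.toNat 14 = 14 from rfl, show Int.toNat 15 = 15 from rfl, show Int.toNat 18 = 18 from rfl, show Int.toNat 21 = 21 from rfl, show Int.toNat 22 = 22 from rfl, show Int.toNat 28 = 28 from rfl, show Int.toNat 30 = 30 from rfl]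
  simp only [show ((0xefc60000 : Int) = (((0xefc60000 : Nat)) : Int)) from by norm_num,
    show ((0 : Int) = (((0 : Nat)) : Int)) from rfl,
    ← Int.natCast_shiftLeft,
    PySem.Int.bxor_natCast, PySem.Int.band_natCast, Nat.cast_inj]
  simp

lemma bridgeB3 (n : Nat) : undoLeftMask (n : Int) 7 0x9d2c5680 = ((s3B n : Nat) : Int) := by
  simp only [undoLeftMask, pyRange_7, List.foldl_cons, List.foldl_nil, s3B]
  norm_num [show Int.toNat 0 = 0 from rfl, show Int.toNat 7 = 7 from rfl, show Int.toNat 10 = 10 from rfl, show Int.toNat 11 = 11 from rfl, show Int.toNat 14 = 14 from rfl, show Int.toNat 15 = 15 from rfl, show Int.toNat 18 = 18 from rfl, show Int.toNat 21 = 21 from rfl, show Int.toNat 22 = 22 from rfl, show Int.toNat 28 = 28 from rfl, show Int.toNat 30 = 30 from rfl]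
  simp only [show ((0x9d2c5680 : Int) = (((0x9d2c5680 : Nat)) : Int)) from by norm_num,
    show ((0 : Int) = (((0 : Nat)) : Int)) from rfl,
    ← Int.natCast_shiftLeft,
    PySem.Int.bxor_natCast, PySem.Int.band_natCast, Nat.cast_inj]
  simp

lemma bridgeB4 (n : Nat) : undoRight (n : Int) 11 = ((s4B n : Nat) : Int) := by
  simp only [undoRight, pyRange_11, List.foldl_cons, List.foldl_nil, s4B]
  norm_num [show Int.toNat 0 = 0 from rfl, show Int.toNat 7 = 7 from rfl, show Int.toNat 10 = 10 from rfl, show Int.toNat 11 = 11 from rfl, show Int.toNat 14 = 14 from rfl, show Int.toNat 15 = 15 from rfl, show Int.toNat 18 = 18 from rfl, show Int.toNat 21 = 21 from rfl, show Int.toNat 22 = 22 from rfl, show Int.toNat 28 = 28 from rfl, show Int.toNat 30 = 30 from rfl]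
  simp only [show ((1 : Int) <<< (10 : Nat) - 1 = (((1023 : Nat)) : Int)) from by decide,
    show ((0 : Int) = (((0 : Nat)) : Int)) from rfl,
    ← Int.natCast_shiftRight, ← Int.natCast_shiftLeft,
    PySem.Int.bxor_natCast, PySem.Int.band_natCast, Nat.cast_inj]
  simp

lemma bridgeB (n : Nat) :
    untempering_alt (n : Int) = ((s4B (s3B (s2B (s1B n))) : Nat) : Int) := by
  simp only [untempering_alt, bridgeB1, bridgeB2, bridgeB3, bridgeB4]

lemma main_nat (n : Nat) (hn : n < 2 ^ 32) :
    untempering (n : Int) = untempering_alt (n : Int) := by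
  rw [bridgeA, bridgeB, ← eq_s1 n hn, ← eq_s2 _ (range_s1A hn),
    ← eq_s3 _ (range_s2A (range_s1A hn)), ← eq_s4 _ (range_s3A (range_s2A (range_s1A hn)))]

-- ===== VERDICT (by name: the statement is the Claim_ definition above) =====
theorem untempering_spec : Claim_equal_untempering := by
  intro y hdom hpre
  unfold Dom_untempering pvDomInt at hdom
  unfold Pre_untempering at hpre
  unfold Spec_untempering
  have hy : ((y.toNat : Nat) : Int) = y := Int.toNat_of_nonneg hpre
  have hb : y ≤ 2147483648 := (of_decide_eq_true hdom).2
  have hn : y.toNat < 2 ^ 32 := by omega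
  rw [← hy, main_nat y.toNat hn]
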